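-- pv_equiv track=rewrite | github.com/JK42JJ/warfront | core.py | union_find_sim
-- ===== SOURCE A (Python) =====
-- from typing import List, Tuple, Any, Dict
--
-- def union_find_sim(units: List[str], ops: List[Tuple[str, str, str]]):
--     parent = {u: u for u in units}
--     def find(u):
--         if parent[u] == u: return u
--         parent[u] = find(parent[u])
--         return parent[u]
--
--     def groups():
--         g = {}
--         for u in units:
--             root = find(u)
--             g.setdefault(root, []).append(u)
--         return g
--
--     steps = []
--     # Initial state
--     steps.append(({u: find(u) for u in units}, f"Initial State — {len(units)} Independent Units"))
--
--     for op, a, b in ops: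
--         if op == "union":
--             root_a, root_b = find(a), find(b)
--             if root_a != root_b:
--                 parent[root_a] = root_b
--                 steps.append(({u: find(u) for u in units}, f"'{a}' ∪ '{b}' Merged — Unified into {len(groups())} frontlines"))
--             else:
--                 steps.append(({u: find(u) for u in units}, f"'{a}', '{b}' already on same frontline — Skipping"))
--
--     steps.append(({u: find(u) for u in units}, f"✅ Finalized Reorganization into {len(groups())} frontlines"))
--     return steps
-- ===== SOURCE B (Python) =====
-- def union_find_sim(units, ops):
--     # quick-find: rep[u] is always u's current root; no recursion, no path compression
--     rep = {u: u for u in units}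
--     def snap(label):
--         return ({u: rep[u] for u in units}, label)
--     steps = [snap(f"Initial State — {len(units)} Independent Units")]
--     for op, a, b in ops:
--         if op != "union":
--             continue
--         ra, rb = rep[a], rep[b]
--         if ra != rb:
--             rep = {u: (rb if r == ra else r) for u, r in rep.items()}
--             steps.append(snap(f"'{a}' ∪ '{b}' Merged — Unified into {len(set(rep.values()))} frontlines"))
--         else:
--             steps.append(snap(f"'{a}', '{b}' already on same frontline — Skipping"))
--     steps.append(snap(f"✅ Finalized Reorganization into {len(set(rep.values()))} frontlines"))
--     return steps
-- ===== Notes on version B (the rewrite author's own statement) =====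
-- stated objective: faster
-- what changed: Replaces the recursive path-compressed union-find (with a groups() helper re-running find over all units for labels) by a flat quick-find map rep where rep[u] is always u's current root: a union rewrites ra-values to rb in one dict comprehension, snapshots read rep directly, and group counts are len(set(rep.values())).
import Mathlib
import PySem

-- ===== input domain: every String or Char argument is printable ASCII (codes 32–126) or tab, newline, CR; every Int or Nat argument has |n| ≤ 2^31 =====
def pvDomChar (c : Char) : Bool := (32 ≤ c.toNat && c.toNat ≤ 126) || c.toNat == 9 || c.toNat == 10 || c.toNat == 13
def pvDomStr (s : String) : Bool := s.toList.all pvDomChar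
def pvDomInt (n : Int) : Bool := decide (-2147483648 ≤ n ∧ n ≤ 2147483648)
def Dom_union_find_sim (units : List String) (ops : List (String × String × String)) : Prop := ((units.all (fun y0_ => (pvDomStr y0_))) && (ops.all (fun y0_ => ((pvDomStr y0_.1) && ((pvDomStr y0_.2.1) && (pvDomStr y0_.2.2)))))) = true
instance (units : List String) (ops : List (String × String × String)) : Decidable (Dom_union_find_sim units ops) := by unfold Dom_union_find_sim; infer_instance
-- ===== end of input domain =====

-- B replaces A's recursive path-compressed union-find with a flat quick-find map (rep[u] is always
-- u's current root), removing the recursive find and the groups() helper (measured constant-factor speedup).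
-- Return-value equivalence only: A mutates no argument, neither does B.

-- ===== PORT A =====
-- recursive find with path compression; fuel is only a totality guard (chains have depth ≤ 2
-- between snapshots, so any fuel ≥ 3 is enough; the 0/missing-key fallbacks are unreachable
-- under Pre_: a missing key is Python's KeyError, excluded by Pre_).
def findA : Nat → PySem.Dict String String → String → (String × PySem.Dict String String)
  | 0, parent, u => (u, parent)
  | fuel+1, parent, u =>
    match parent.get? u with
    | none => (u, parent)
    | some p =>
      if p = u then (u, parent)
      else
        let res := findA fuel parent p
        (res.1, res.2.insert u res.1)

-- {u: find(u) for u in units}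
def snapA (fuel : Nat) (units : List String) (parent : PySem.Dict String String) :
    PySem.Dict String String × PySem.Dict String String :=
  units.foldl (fun st u =>
    let r := findA fuel st.2 u
    (st.1.insert u r.1, r.2)) (PySem.Dict.empty, parent)

-- groups(): g.setdefault(find(u), []).append(u)
def groupsA (fuel : Nat) (units : List String) (parent : PySem.Dict String String) :
    PySem.Dict String (List String) × PySem.Dict String String :=
  units.foldl (fun st u =>
    let r := findA fuel st.2 u
    (st.1.modify r.1 [] (· ++ [u]), r.2)) (PySem.Dict.empty, parent)

def union_find_sim (units : List String) (ops : List (String × String × String)) :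
    List ((List (String × String)) × String) :=
  let fuel := units.length + 3
  let parent0 := units.foldl (fun d u => d.insert u u) PySem.Dict.empty
  let init := snapA fuel units parent0
  let st := ops.foldl (fun (st : List ((List (String × String)) × String) × PySem.Dict String String) t =>
    let (op, a, b) := t
    if op = "union" then
      let fa := findA fuel st.2 a
      let fb := findA fuel fa.2 b
      if fa.1 ≠ fb.1 then
        let s := snapA fuel units (fb.2.insert fa.1 fb.1)
        let g := groupsA fuel units s.2
        (st.1 ++ [(s.1.items, "'" ++ a ++ "' ∪ '" ++ b ++ "' Merged — Unified into " ++ PySem.Int.toStr (g.1.size : Int) ++ " frontlines")], g.2)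
      else
        let s := snapA fuel units fb.2
        (st.1 ++ [(s.1.items, "'" ++ a ++ "', '" ++ b ++ "' already on same frontline — Skipping")], s.2)
    else st)
    ([(init.1.items, "Initial State — " ++ PySem.Int.toStr (units.length : Int) ++ " Independent Units")], init.2)
  let fin := snapA fuel units st.2
  let g := groupsA fuel units fin.2
  st.1 ++ [(fin.1.items, "✅ Finalized Reorganization into " ++ PySem.Int.toStr (g.1.size : Int) ++ " frontlines")]

-- ===== PORT B =====
-- {u: rep[u] for u in units}  (rep[u] always present under Pre_; getD is the total form)
def snapB (units : List String) (rep : PySem.Dict String String) : PySem.Dict String String :=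
  units.foldl (fun d u => d.insert u (rep.getD u u)) PySem.Dict.empty

-- len(set(rep.values()))
def countB (rep : PySem.Dict String String) : Nat :=
  (PySem.Set.ofList rep.values).length

-- {u: (rb if r == ra else r) for u, r in rep.items()}
def mergeB (rep : PySem.Dict String String) (ra rb : String) : PySem.Dict String String :=
  rep.items.foldl (fun d p => d.insert p.1 (if p.2 = ra then rb else p.2)) PySem.Dict.empty

def union_find_sim_alt (units : List String) (ops : List (String × String × String)) :
    List ((List (String × String)) × String) :=
  let rep0 := units.foldl (fun d u => d.insert u u) PySem.Dict.empty
  let st := ops.foldl (fun (st : PySem.Dict String String × List ((List (String × String)) × String)) t =>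
    let (op, a, b) := t
    if op = "union" then
      let rep := st.1
      let ra := rep.getD a a
      let rb := rep.getD b b
      if ra ≠ rb then
        let rep' := mergeB rep ra rb
        (rep', st.2 ++ [((snapB units rep').items, "'" ++ a ++ "' ∪ '" ++ b ++ "' Merged — Unified into " ++ PySem.Int.toStr (countB rep' : Int) ++ " frontlines")])
      else
        (rep, st.2 ++ [((snapB units rep).items, "'" ++ a ++ "', '" ++ b ++ "' already on same frontline — Skipping")])
    else st)
    (rep0, [((snapB units rep0).items, "Initial State — " ++ PySem.Int.toStr (units.length : Int) ++ " Independent Units")])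
  st.2 ++ [((snapB units st.1).items, "✅ Finalized Reorganization into " ++ PySem.Int.toStr (countB st.1 : Int) ++ " frontlines")]

-- ===== PRECONDITION & SPEC =====
-- Pre_ excludes exactly the inputs where Python A raises KeyError: a "union" op naming a unit
-- that is not in `units`.
def Pre_union_find_sim (units : List String) (ops : List (String × String × String)) : Prop :=
  ∀ t ∈ ops, t.1 = "union" → t.2.1 ∈ units ∧ t.2.2 ∈ units
instance (units : List String) (ops : List (String × String × String)) : Decidable (Pre_union_find_sim units ops) := by unfold Pre_union_find_sim; infer_instance

def pvWitness_union_find_sim : List String × (List (String × String × String)) :=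
  (["a", "b", "c"], [("union", "a", "b"), ("union", "b", "a"), ("move", "z", "q")])

def Spec_union_find_sim (units : List String) (ops : List (String × String × String)) (out : List ((List (String × String)) × String)) : Prop := out = union_find_sim_alt units ops
instance (units : List String) (ops : List (String × String × String)) (out : List ((List (String × String)) × String)) : Decidable (Spec_union_find_sim units ops out) := by unfold Spec_union_find_sim; infer_instance

-- ===== CLAIM (what is proved, stated in full; the proofs are below) =====
def Claim_equal_union_find_sim : Prop := ∀ (units : List String) (ops : List (String × String × String)), Dom_union_find_sim units ops → Pre_union_find_sim units ops → Spec_union_find_sim units ops (union_find_sim units ops)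

-- ===== LEMMAS AND PROOFS =====

-- `Inv parent rep`: every chain in `parent` is fully compressed and `rep` is its root map.
def InvP (parent rep : PySem.Dict String String) : Prop :=
  (∀ w, parent.get? w = none ↔ rep.get? w = none) ∧
  (∀ u r, rep.get? u = some r → parent.get? u = some r ∧ rep.get? r = some r)

-- `Inv2 parent rep`: chains have depth ≤ 2 and still lead to `rep`'s roots (transient state
-- right after a union, before the snapshot recompresses).
def Inv2P (parent rep : PySem.Dict String String) : Prop :=
  (∀ w, parent.get? w = none ↔ rep.get? w = none) ∧
  (∀ u r, rep.get? u = some r → rep.get? r = some r ∧ parent.get? r = some r ∧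
    ∃ v, parent.get? u = some v ∧ (v = r ∨ (rep.get? v = some r ∧ parent.get? v = some r)))

theorem InvP_imp_Inv2P (parent rep : PySem.Dict String String) (h : InvP parent rep) :
    Inv2P parent rep := by
  obtain ⟨h1, h2⟩ := h
  refine ⟨h1, fun u r hu => ?_⟩
  obtain ⟨hpu, hrr⟩ := h2 u r hu
  exact ⟨hrr, (h2 r r hrr).1, r, hpu, Or.inl rfl⟩

theorem InvP_congr (parent parent' rep : PySem.Dict String String)
    (hpw : ∀ w, parent'.get? w = parent.get? w) (h : InvP parent rep) : InvP parent' rep := by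
  obtain ⟨h1, h2⟩ := h
  refine ⟨fun w => by rw [hpw]; exact h1 w, fun u r hu => ?_⟩
  obtain ⟨hpu, hrr⟩ := h2 u r hu
  exact ⟨by rw [hpw]; exact hpu, hrr⟩

theorem get?_foldl_insert_id (us : List String) (d : PySem.Dict String String) (w : String) :
    (us.foldl (fun d u => d.insert u u) d).get? w = if w ∈ us then some w else d.get? w := by
  induction us generalizing d with
  | nil => simp
  | cons u us ih =>
    rw [List.foldl_cons, ih]
    rw [PySem.Dict.get?_insert d u w u]
    by_cases hw : w ∈ us
    · simp [hw]
    · by_cases hu : w = u <;> simp [hw, hu]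

theorem Inv2P_update (parent parent' rep : PySem.Dict String String) (u r : String)
    (hI : Inv2P parent rep) (hu : rep.get? u = some r)
    (hpw : ∀ w, parent'.get? w = if w = u then some r else parent.get? w) :
    Inv2P parent' rep := by
  obtain ⟨h1, h2⟩ := hI
  constructor
  · intro w
    rw [hpw w]
    by_cases hwu : w = u
    · subst hwu
      rw [if_pos rfl]
      constructor
      · intro h; cases h
      · intro h; rw [h] at hu; cases hu
    · rw [if_neg hwu]; exact h1 w
  · intro w s hws
    obtain ⟨hss, hps, v, hpv, hv⟩ := h2 w s hws
    refine ⟨hss, ?_, ?_⟩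
    · rw [hpw s]
      by_cases hsu : s = u
      · subst hsu
        rw [if_pos rfl]
        rw [hu] at hss; injection hss with h; rw [h]
      · rw [if_neg hsu]; exact hps
    · by_cases hwu : w = u
      · subst hwu
        rw [hws] at hu; injection hu with h; subst h
        exact ⟨s, by rw [hpw w, if_pos rfl], Or.inl rfl⟩
      · refine ⟨v, by rw [hpw w, if_neg hwu]; exact hpv, ?_⟩
        cases hv with
        | inl h => exact Or.inl h
        | inr h =>
          obtain ⟨hvs, hpvs⟩ := h
          refine Or.inr ⟨hvs, ?_⟩
          rw [hpw v]
          by_cases hvu : v = u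
          · subst hvu
            rw [if_pos rfl]
            rw [hu] at hvs; injection hvs with h; rw [h]
          · rw [if_neg hvu]; exact hpvs

theorem findA_step (fuel : Nat) (parent : PySem.Dict String String) (u p : String)
    (hp : parent.get? u = some p) :
    findA (fuel + 1) parent u =
      if p = u then (u, parent)
      else ((findA fuel parent p).1, (findA fuel parent p).2.insert u (findA fuel parent p).1) := by
  simp [findA, hp]

theorem findA_spec (fuel : Nat) (h3 : 3 ≤ fuel) (parent rep : PySem.Dict String String)
    (hI : Inv2P parent rep) (u r : String) (hu : rep.get? u = some r) :
    (findA fuel parent u).1 = r ∧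
    ∀ w, (findA fuel parent u).2.get? w = if w = u then some r else parent.get? w := by
  obtain ⟨k, rfl⟩ : ∃ k, fuel = k + 3 := ⟨fuel - 3, by omega⟩
  obtain ⟨h1, h2⟩ := hI
  obtain ⟨hrr, hpr, v, hpu, hv⟩ := h2 u r hu
  rw [show k + 3 = (k + 2) + 1 from rfl]
  by_cases hvu : v = u
  · -- u is its own root, hence r = u
    rw [hvu] at hpu hv
    have hru : r = u := by
      cases hv with
      | inl h => exact h.symm
      | inr h => rw [hpu] at h; injection h.2 with h'; exact h'.symm
    rw [findA_step (k + 2) parent u u hpu, if_pos rfl]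
    refine ⟨hru.symm, fun w => ?_⟩
    by_cases hw : w = u
    · rw [if_pos hw, hw, hpu, hru]
    · rw [if_neg hw]
  · cases hv with
    | inl hvr =>
      -- parent[u] = r directly, and r is a root
      rw [hvr] at hpu hvu
      rw [findA_step (k + 2) parent u r hpu, if_neg hvu,
          show k + 2 = (k + 1) + 1 from rfl,
          findA_step (k + 1) parent r r hpr, if_pos rfl]
      exact ⟨rfl, fun w => PySem.Dict.get?_insert parent u w r⟩
    | inr h =>
      obtain ⟨hvr, hpv⟩ := h
      -- parent[u] = v, parent[v] = r, r a root
      rw [findA_step (k + 2) parent u v hpu, if_neg hvu,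
          show k + 2 = (k + 1) + 1 from rfl]
      by_cases hrv : r = v
      · -- v is itself the root
        rw [← hrv] at hpv hpu hvu ⊢
        rw [findA_step (k + 1) parent r r hpv, if_pos rfl]
        exact ⟨rfl, fun w => PySem.Dict.get?_insert parent u w r⟩
      · have hrv' : ¬ r = v := hrv
        rw [findA_step (k + 1) parent v r hpv, if_neg hrv']
        rw [show k + 1 = k + 1 from rfl, findA_step k parent r r hpr, if_pos rfl]
        refine ⟨rfl, fun w => ?_⟩
        rw [PySem.Dict.get?_insert (parent.insert v r) u w r,
            PySem.Dict.get?_insert parent v w r]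
        by_cases hw : w = u
        · rw [if_pos hw, if_pos hw]
        · rw [if_neg hw, if_neg hw]
          by_cases hwv : w = v
          · rw [if_pos hwv, hwv, hpv]
          · rw [if_neg hwv]

theorem snap_go (fuel : Nat) (h3 : 3 ≤ fuel) (rep : PySem.Dict String String)
    (us : List String) :
    ∀ (parent acc : PySem.Dict String String), Inv2P parent rep →
    (∀ u ∈ us, (rep.get? u).isSome) →
    (us.foldl (fun st u =>
        let r := findA fuel st.2 u
        (st.1.insert u r.1, r.2)) (acc, parent)).1
      = us.foldl (fun d u => d.insert u (rep.getD u u)) acc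
    ∧ ∀ w, (us.foldl (fun st u =>
        let r := findA fuel st.2 u
        (st.1.insert u r.1, r.2)) (acc, parent)).2.get? w
      = if w ∈ us then rep.get? w else parent.get? w := by
  induction us with
  | nil => intro parent acc _ _; exact ⟨rfl, fun w => by simp⟩
  | cons u us ih =>
    intro parent acc hI hmem
    obtain ⟨r, hr⟩ : ∃ r, rep.get? u = some r :=
      Option.isSome_iff_exists.mp (hmem u (List.mem_cons_self))
    obtain ⟨hf1, hf2⟩ := findA_spec fuel h3 parent rep hI u r hr
    have hI' : Inv2P (findA fuel parent u).2 rep := Inv2P_update parent _ rep u r hI hr hf2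
    have hgd : rep.getD u u = r := PySem.Dict.getD_of_get?_eq_some rep u hr
    obtain ⟨ih1, ih2⟩ := ih (findA fuel parent u).2 (acc.insert u r)
      hI' (fun v hv => hmem v (List.mem_cons_of_mem u hv))
    constructor
    · rw [List.foldl_cons, List.foldl_cons]
      simp only [hf1]
      rw [ih1, hgd]
    · intro w
      rw [List.foldl_cons]
      simp only [hf1]
      rw [ih2 w]
      by_cases hw : w ∈ us
      · rw [if_pos hw, if_pos (List.mem_cons_of_mem u hw)]
      · rw [if_neg hw, hf2 w]
        by_cases hwu : w = u
        · rw [if_pos hwu, if_pos (by rw [hwu]; exact List.mem_cons_self), hwu, hr]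
        · rw [if_neg hwu, if_neg (by simp [hwu, hw])]

theorem InvP_after_snap (units : List String) (rep q p : PySem.Dict String String)
    (hkeys : rep.keys = PySem.Set.ofList units)
    (hroot : ∀ u r, rep.get? u = some r → rep.get? r = some r)
    (hq : ∀ w, q.get? w = none ↔ rep.get? w = none)
    (hpw : ∀ w, p.get? w = if w ∈ units then rep.get? w else q.get? w) : InvP p rep := by
  have hmemkeys : ∀ w r, rep.get? w = some r → w ∈ units := by
    intro w r hw
    have : ¬ w ∉ rep.keys := by
      intro hn
      rw [(PySem.Dict.get?_eq_none_iff_not_mem_keys rep w).2 hn] at hw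
      cases hw
    have hkw : w ∈ rep.keys := not_not.mp this
    rw [hkeys] at hkw
    exact (PySem.Set.mem_ofList units w).mp hkw
  constructor
  · intro w
    rw [hpw w]
    by_cases hw : w ∈ units
    · rw [if_pos hw]
    · rw [if_neg hw]; exact hq w
  · intro u r hu
    have hun : u ∈ units := hmemkeys u r hu
    exact ⟨by rw [hpw u, if_pos hun]; exact hu, hroot u r hu⟩

theorem groups_go (fuel : Nat) (h3 : 3 ≤ fuel) (rep : PySem.Dict String String)
    (us : List String) :
    ∀ (parent : PySem.Dict String String) (g : PySem.Dict String (List String)),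
    InvP parent rep → (∀ u ∈ us, (rep.get? u).isSome) →
    (us.foldl (fun st u =>
        let r := findA fuel st.2 u
        (st.1.modify r.1 [] (· ++ [u]), r.2)) (g, parent)).1.keys
      = PySem.Set.update g.keys (us.map (fun u => rep.getD u u))
    ∧ ∀ w, (us.foldl (fun st u =>
        let r := findA fuel st.2 u
        (st.1.modify r.1 [] (· ++ [u]), r.2)) (g, parent)).2.get? w = parent.get? w := by
  induction us with
  | nil => intro parent g _ _; exact ⟨rfl, fun w => rfl⟩
  | cons u us ih =>
    intro parent g hI hmem
    obtain ⟨r, hr⟩ : ∃ r, rep.get? u = some r :=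
      Option.isSome_iff_exists.mp (hmem u (List.mem_cons_self))
    obtain ⟨hf1, hf2⟩ := findA_spec fuel h3 parent rep (InvP_imp_Inv2P parent rep hI) u r hr
    have hpur : parent.get? u = some r := (hI.2 u r hr).1
    have hppw : ∀ w, (findA fuel parent u).2.get? w = parent.get? w := by
      intro w
      rw [hf2 w]
      by_cases hw : w = u
      · rw [if_pos hw, hw, hpur]
      · rw [if_neg hw]
    have hI' : InvP (findA fuel parent u).2 rep := InvP_congr parent _ rep hppw hI
    have hgd : rep.getD u u = r := PySem.Dict.getD_of_get?_eq_some rep u hr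
    obtain ⟨ih1, ih2⟩ := ih (findA fuel parent u).2 (g.modify r [] (· ++ [u]))
      hI' (fun v hv => hmem v (List.mem_cons_of_mem u hv))
    constructor
    · rw [List.foldl_cons]
      simp only [hf1]
      rw [ih1, List.map_cons, hgd]
      rw [show PySem.Set.update g.keys (r :: List.map (fun u => rep.getD u u) us)
            = PySem.Set.update (PySem.Set.add g.keys r) (List.map (fun u => rep.getD u u) us) from rfl]
      congr 1
      rw [PySem.Dict.keys_modify,
          show PySem.Set.add g.keys r = if g.keys.contains r then g.keys else g.keys ++ [r] from rfl]
      by_cases hc : r ∈ g.keys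
      · rw [PySem.Dict.keys_insert_of_contains g _ ((PySem.Dict.contains_iff_mem_keys g r).mpr hc),
            if_pos (by simpa using hc)]
      · have hcf : g.contains r = false :=
          Bool.eq_false_iff.mpr (fun h => hc ((PySem.Dict.contains_iff_mem_keys g r).mp h))
        rw [PySem.Dict.keys_insert_of_not_contains g _ hcf, if_neg (by simpa using hc)]
    · intro w
      rw [List.foldl_cons]
      simp only [hf1]
      rw [ih2 w, hppw w]

theorem count_eq (units : List String) (rep : PySem.Dict String String)
    (hkeys : rep.keys = PySem.Set.ofList units) :
    (PySem.Set.ofList (units.map (fun u => rep.getD u u))).length = countB rep := by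
  have hnd : rep.keys.Nodup := by rw [hkeys]; exact PySem.Set.nodup_ofList units
  rw [countB, PySem.Dict.values_eq_map_keys rep hnd ""]
  apply List.Perm.length_eq
  apply (List.perm_ext_iff_of_nodup (PySem.Set.nodup_ofList _) (PySem.Set.nodup_ofList _)).2
  intro x
  rw [PySem.Set.mem_ofList, PySem.Set.mem_ofList, List.mem_map, List.mem_map]
  constructor
  · rintro ⟨u, hu, hx⟩
    refine ⟨u, by rw [hkeys]; exact (PySem.Set.mem_ofList units u).mpr hu, ?_⟩
    have hmem : u ∈ rep.keys := by rw [hkeys]; exact (PySem.Set.mem_ofList units u).mpr hu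
    obtain ⟨r, hr⟩ : ∃ r, rep.get? u = some r := by
      rcases h : rep.get? u with _ | r
      · exact absurd ((PySem.Dict.get?_eq_none_iff_not_mem_keys rep u).mp h) (not_not.mpr hmem)
      · exact ⟨r, rfl⟩
    rw [PySem.Dict.getD_of_get?_eq_some rep "" hr, ← hx,
        PySem.Dict.getD_of_get?_eq_some rep u hr]
  · rintro ⟨u, hu, hx⟩
    have hun : u ∈ units := (PySem.Set.mem_ofList units u).mp (by rw [← hkeys]; exact hu)
    refine ⟨u, hun, ?_⟩
    obtain ⟨r, hr⟩ : ∃ r, rep.get? u = some r := by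
      rcases h : rep.get? u with _ | r
      · exact absurd ((PySem.Dict.get?_eq_none_iff_not_mem_keys rep u).mp h) (not_not.mpr hu)
      · exact ⟨r, rfl⟩
    rw [PySem.Dict.getD_of_get?_eq_some rep u hr, ← hx,
        PySem.Dict.getD_of_get?_eq_some rep "" hr]

theorem items_mergeB (rep : PySem.Dict String String) (ra rb : String)
    (h : rep.keys.Nodup) :
    (mergeB rep ra rb).items = rep.items.map (fun p => (p.1, if p.2 = ra then rb else p.2)) := by
  rw [mergeB]
  rw [PySem.Dict.items_foldl_insert_fresh rep.items Prod.fst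
        (fun p => if p.2 = ra then rb else p.2) PySem.Dict.empty
        (by intro a _; exact PySem.Dict.contains_empty _) (by exact h)]
  rfl

theorem keys_mergeB (rep : PySem.Dict String String) (ra rb : String)
    (h : rep.keys.Nodup) : (mergeB rep ra rb).keys = rep.keys := by
  have : (mergeB rep ra rb).keys = (mergeB rep ra rb).items.map Prod.fst := rfl
  rw [this, items_mergeB rep ra rb h, List.map_map]
  rfl

theorem get?_mergeB (rep : PySem.Dict String String) (ra rb : String)
    (h : rep.keys.Nodup) (w : String) :
    (mergeB rep ra rb).get? w = (rep.get? w).map (fun v => if v = ra then rb else v) := by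
  rcases hw : rep.get? w with _ | v
  · rw [(PySem.Dict.get?_eq_none_iff_not_mem_keys _ w).2 (by
      rw [keys_mergeB rep ra rb h]
      exact (PySem.Dict.get?_eq_none_iff_not_mem_keys rep w).mp hw)]
    rfl
  · have hmem : (w, if v = ra then rb else v) ∈ (mergeB rep ra rb).items := by
      rw [items_mergeB rep ra rb h]
      exact List.mem_map.mpr ⟨(w, v), PySem.Dict.mem_items_of_get?_eq_some rep hw, rfl⟩
    rw [PySem.Dict.get?_of_mem_items _ hmem (by rw [keys_mergeB rep ra rb h]; exact h)]
    rfl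

theorem Inv2P_merge (parent p2 rep : PySem.Dict String String) (ra rb : String)
    (hI : InvP parent rep) (hra : rep.get? ra = some ra) (hrb : rep.get? rb = some rb)
    (hne : ¬ ra = rb) (hnd : rep.keys.Nodup)
    (hpw : ∀ w, p2.get? w = if w = ra then some rb else parent.get? w) :
    Inv2P p2 (mergeB rep ra rb) := by
  obtain ⟨h1, h2⟩ := hI
  have hm : ∀ w, (mergeB rep ra rb).get? w = (rep.get? w).map (fun v => if v = ra then rb else v) :=
    get?_mergeB rep ra rb hnd
  constructor
  · intro w
    rw [hpw w, hm w]
    by_cases hw : w = ra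
    · rw [if_pos hw, hw, hra]
      simp
    · rw [if_neg hw, h1 w]
      rcases h : rep.get? w with _ | v <;> simp
  · intro u r' hu
    rw [hm u] at hu
    rcases hru : rep.get? u with _ | r
    · rw [hru] at hu; cases hu
    · rw [hru] at hu
      injection hu with hu'
      have hu2 : (if r = ra then rb else r) = r' := hu'
      obtain ⟨hpu, hrr⟩ := h2 u r hru
      by_cases hr : r = ra
      · -- old root was ra; new root is rb
        have hr' : r' = rb := by rw [← hu2, if_pos hr]
        rw [hr']
        refine ⟨?_, ?_, ?_⟩
        · rw [hm rb, hrb]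
          simp
        · rw [hpw rb, if_neg (fun h => hne h.symm)]
          exact (h2 rb rb hrb).1
        · by_cases hua : u = ra
          · exact ⟨rb, by rw [hpw u, if_pos hua], Or.inl rfl⟩
          · refine ⟨ra, by rw [hpw u, if_neg hua, hpu, hr], Or.inr ⟨?_, ?_⟩⟩
            · rw [hm ra, hra]
              simp
            · rw [hpw ra, if_pos rfl]
      · -- old root r ≠ ra is unchanged
        have hr' : r' = r := by rw [← hu2, if_neg hr]
        rw [hr']
        refine ⟨?_, ?_, ?_⟩
        · rw [hm r, hrr]
          simp [hr]
        · rw [hpw r, if_neg hr]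
          exact (h2 r r hrr).1
        · have hua : ¬ u = ra := by
            intro h
            rw [h, hra] at hru
            injection hru with h'
            exact hr h'.symm
          exact ⟨r, by rw [hpw u, if_neg hua, hpu], Or.inl rfl⟩

theorem exists_get?_of_mem (rep : PySem.Dict String String) (units : List String)
    (hkeys : rep.keys = PySem.Set.ofList units) (u : String) (hu : u ∈ units) :
    ∃ r, rep.get? u = some r := by
  have hmem : u ∈ rep.keys := by
    rw [hkeys]; exact (PySem.Set.mem_ofList units u).mpr hu
  rcases h : rep.get? u with _ | r
  · exact absurd ((PySem.Dict.get?_eq_none_iff_not_mem_keys rep u).mp h) (not_not.mpr hmem)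
  · exact ⟨r, rfl⟩

theorem size_eq_keys_length (d : PySem.Dict String (List String)) : d.size = d.keys.length := by
  have : d.keys = d.items.map Prod.fst := rfl
  rw [this, List.length_map]
  rfl

theorem loop_spec (units : List String) (fuel : Nat) (h3 : 3 ≤ fuel)
    (ops : List (String × String × String)) :
    ∀ (parent rep : PySem.Dict String String)
      (steps : List ((List (String × String)) × String)),
    (∀ t ∈ ops, t.1 = "union" → t.2.1 ∈ units ∧ t.2.2 ∈ units) →
    InvP parent rep → rep.keys = PySem.Set.ofList units →
    (ops.foldl (fun (st : List ((List (String × String)) × String) × PySem.Dict String String) t =>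
      let (op, a, b) := t
      if op = "union" then
        let fa := findA fuel st.2 a
        let fb := findA fuel fa.2 b
        if fa.1 ≠ fb.1 then
          let s := snapA fuel units (fb.2.insert fa.1 fb.1)
          let g := groupsA fuel units s.2
          (st.1 ++ [(s.1.items, "'" ++ a ++ "' ∪ '" ++ b ++ "' Merged — Unified into " ++ PySem.Int.toStr (g.1.size : Int) ++ " frontlines")], g.2)
        else
          let s := snapA fuel units fb.2
          (st.1 ++ [(s.1.items, "'" ++ a ++ "', '" ++ b ++ "' already on same frontline — Skipping")], s.2)
      else st) (steps, parent)).1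
      = (ops.foldl (fun (st : PySem.Dict String String × List ((List (String × String)) × String)) t =>
      let (op, a, b) := t
      if op = "union" then
        let rep := st.1
        let ra := rep.getD a a
        let rb := rep.getD b b
        if ra ≠ rb then
          let rep' := mergeB rep ra rb
          (rep', st.2 ++ [((snapB units rep').items, "'" ++ a ++ "' ∪ '" ++ b ++ "' Merged — Unified into " ++ PySem.Int.toStr (countB rep' : Int) ++ " frontlines")])
        else
          (rep, st.2 ++ [((snapB units rep).items, "'" ++ a ++ "', '" ++ b ++ "' already on same frontline — Skipping")])
      else st) (rep, steps)).2
    ∧ InvP (ops.foldl (fun (st : List ((List (String × String)) × String) × PySem.Dict String String) t =>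
      let (op, a, b) := t
      if op = "union" then
        let fa := findA fuel st.2 a
        let fb := findA fuel fa.2 b
        if fa.1 ≠ fb.1 then
          let s := snapA fuel units (fb.2.insert fa.1 fb.1)
          let g := groupsA fuel units s.2
          (st.1 ++ [(s.1.items, "'" ++ a ++ "' ∪ '" ++ b ++ "' Merged — Unified into " ++ PySem.Int.toStr (g.1.size : Int) ++ " frontlines")], g.2)
        else
          let s := snapA fuel units fb.2
          (st.1 ++ [(s.1.items, "'" ++ a ++ "', '" ++ b ++ "' already on same frontline — Skipping")], s.2)
      else st) (steps, parent)).2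
      ((ops.foldl (fun (st : PySem.Dict String String × List ((List (String × String)) × String)) t =>
      let (op, a, b) := t
      if op = "union" then
        let rep := st.1
        let ra := rep.getD a a
        let rb := rep.getD b b
        if ra ≠ rb then
          let rep' := mergeB rep ra rb
          (rep', st.2 ++ [((snapB units rep').items, "'" ++ a ++ "' ∪ '" ++ b ++ "' Merged — Unified into " ++ PySem.Int.toStr (countB rep' : Int) ++ " frontlines")])
        else
          (rep, st.2 ++ [((snapB units rep).items, "'" ++ a ++ "', '" ++ b ++ "' already on same frontline — Skipping")])
      else st) (rep, steps)).1)
    ∧ ((ops.foldl (fun (st : PySem.Dict String String × List ((List (String × String)) × String)) t =>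
      let (op, a, b) := t
      if op = "union" then
        let rep := st.1
        let ra := rep.getD a a
        let rb := rep.getD b b
        if ra ≠ rb then
          let rep' := mergeB rep ra rb
          (rep', st.2 ++ [((snapB units rep').items, "'" ++ a ++ "' ∪ '" ++ b ++ "' Merged — Unified into " ++ PySem.Int.toStr (countB rep' : Int) ++ " frontlines")])
        else
          (rep, st.2 ++ [((snapB units rep).items, "'" ++ a ++ "', '" ++ b ++ "' already on same frontline — Skipping")])
      else st) (rep, steps)).1).keys = PySem.Set.ofList units := by
  induction ops with
  | nil => intro parent rep steps _ hI hkeys; exact ⟨rfl, hI, hkeys⟩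
  | cons t ops ih =>
    intro parent rep steps hpre hI hkeys
    obtain ⟨op, a, b⟩ := t
    have hpre' : ∀ t ∈ ops, t.1 = "union" → t.2.1 ∈ units ∧ t.2.2 ∈ units :=
      fun t ht => hpre t (List.mem_cons_of_mem _ ht)
    simp only [List.foldl_cons]
    by_cases hop : op = "union"
    · dsimp only
      rw [if_pos hop, if_pos hop]
      obtain ⟨ha, hb⟩ := hpre (op, a, b) List.mem_cons_self hop
      obtain ⟨ra, hra⟩ := exists_get?_of_mem rep units hkeys a ha
      obtain ⟨rb, hrb⟩ := exists_get?_of_mem rep units hkeys b hb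
      have hgda : rep.getD a a = ra := PySem.Dict.getD_of_get?_eq_some rep a hra
      have hgdb : rep.getD b b = rb := PySem.Dict.getD_of_get?_eq_some rep b hrb
      have hI2 := InvP_imp_Inv2P parent rep hI
      obtain ⟨hfa1, hfa2⟩ := findA_spec fuel h3 parent rep hI2 a ra hra
      have hfapw : ∀ w, (findA fuel parent a).2.get? w = parent.get? w := by
        intro w
        rw [hfa2 w]
        by_cases hw : w = a
        · rw [if_pos hw, hw, (hI.2 a ra hra).1]
        · rw [if_neg hw]
      have hIfa : InvP (findA fuel parent a).2 rep := InvP_congr parent _ rep hfapw hI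
      obtain ⟨hfb1, hfb2⟩ := findA_spec fuel h3 (findA fuel parent a).2 rep
        (InvP_imp_Inv2P _ rep hIfa) b rb hrb
      have hfbpw : ∀ w, (findA fuel (findA fuel parent a).2 b).2.get? w = parent.get? w := by
        intro w
        rw [hfb2 w]
        by_cases hw : w = b
        · rw [if_pos hw, hw, (hI.2 b rb hrb).1]
        · rw [if_neg hw, hfapw w]
      have hIfb : InvP (findA fuel (findA fuel parent a).2 b).2 rep :=
        InvP_congr parent _ rep hfbpw hI
      have hnd : rep.keys.Nodup := by rw [hkeys]; exact PySem.Set.nodup_ofList units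
      have hmemu : ∀ u ∈ units, (rep.get? u).isSome := by
        intro u hu
        obtain ⟨r, hr⟩ := exists_get?_of_mem rep units hkeys u hu
        rw [hr]; rfl
      rw [hfa1, hfb1, hgda, hgdb]
      by_cases hrarb : ra = rb
      · -- already same frontline
        rw [if_neg (not_not.mpr hrarb), if_neg (not_not.mpr hrarb)]
        -- snapshot over the compressed state: A's dict equals snapB units rep
        have hIfb2 := InvP_imp_Inv2P _ rep hIfb
        obtain ⟨hs1, hs2⟩ := snap_go fuel h3 rep units
          (findA fuel (findA fuel parent a).2 b).2 PySem.Dict.empty hIfb2 hmemu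
        have hsnap : (snapA fuel units (findA fuel (findA fuel parent a).2 b).2).1
            = snapB units rep := by
          rw [snapA, snapB]; exact hs1
        have hspw : ∀ w, (snapA fuel units (findA fuel (findA fuel parent a).2 b).2).2.get? w
            = if w ∈ units then rep.get? w else (findA fuel (findA fuel parent a).2 b).2.get? w := by
          rw [snapA]; exact hs2
        have hIs : InvP (snapA fuel units (findA fuel (findA fuel parent a).2 b).2).2 rep :=
          InvP_after_snap units rep _ _ hkeys (fun u r h => (hI.2 u r h).2)
            (fun w => hIfb2.1 w) hspw
        rw [hsnap]
        exact ih _ rep _ hpre' hIs hkeys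
      · rw [if_pos hrarb, if_pos hrarb]
        -- the merge: p2 = parent with ra ↦ rb, rep' = quick-find relabelling
        have hraroot : rep.get? ra = some ra := (hI.2 a ra hra).2
        have hrbroot : rep.get? rb = some rb := (hI.2 b rb hrb).2
        have hp2pw : ∀ w, ((findA fuel (findA fuel parent a).2 b).2.insert ra rb).get? w
            = if w = ra then some rb else parent.get? w := by
          intro w
          rw [PySem.Dict.get?_insert _ ra w rb]
          by_cases hw : w = ra
          · rw [if_pos hw, if_pos hw]
          · rw [if_neg hw, if_neg hw, hfbpw w]
        have hI2m : Inv2P ((findA fuel (findA fuel parent a).2 b).2.insert ra rb) (mergeB rep ra rb) :=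
          Inv2P_merge parent _ rep ra rb hI hraroot hrbroot hrarb hnd hp2pw
        have hkeys' : (mergeB rep ra rb).keys = PySem.Set.ofList units := by
          rw [keys_mergeB rep ra rb hnd, hkeys]
        have hmemu' : ∀ u ∈ units, ((mergeB rep ra rb).get? u).isSome := by
          intro u hu
          obtain ⟨r, hr⟩ := exists_get?_of_mem _ units hkeys' u hu
          rw [hr]; rfl
        obtain ⟨hs1, hs2⟩ := snap_go fuel h3 (mergeB rep ra rb) units
          ((findA fuel (findA fuel parent a).2 b).2.insert ra rb) PySem.Dict.empty hI2m hmemu'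
        have hsnap : (snapA fuel units ((findA fuel (findA fuel parent a).2 b).2.insert ra rb)).1
            = snapB units (mergeB rep ra rb) := by
          rw [snapA, snapB]; exact hs1
        have hspw : ∀ w, (snapA fuel units ((findA fuel (findA fuel parent a).2 b).2.insert ra rb)).2.get? w
            = if w ∈ units then (mergeB rep ra rb).get? w
              else ((findA fuel (findA fuel parent a).2 b).2.insert ra rb).get? w := by
          rw [snapA]; exact hs2
        have hroot' : ∀ u r, (mergeB rep ra rb).get? u = some r → (mergeB rep ra rb).get? r = some r :=
          fun u r h => (hI2m.2 u r h).1
        have hIs : InvP (snapA fuel units ((findA fuel (findA fuel parent a).2 b).2.insert ra rb)).2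
            (mergeB rep ra rb) :=
          InvP_after_snap units (mergeB rep ra rb) _ _ hkeys' hroot' (fun w => hI2m.1 w) hspw
        -- groups over the freshly compressed parent
        obtain ⟨hg1, hg2⟩ := groups_go fuel h3 (mergeB rep ra rb) units
          (snapA fuel units ((findA fuel (findA fuel parent a).2 b).2.insert ra rb)).2
          PySem.Dict.empty hIs hmemu'
        have hgsize : (groupsA fuel units
            (snapA fuel units ((findA fuel (findA fuel parent a).2 b).2.insert ra rb)).2).1.size
            = countB (mergeB rep ra rb) := by
          rw [groupsA, size_eq_keys_length, hg1]
          rw [show PySem.Dict.empty.keys = ([] : List String) from rfl]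
          rw [show PySem.Set.update ([] : List String)
                (units.map (fun u => (mergeB rep ra rb).getD u u))
              = PySem.Set.ofList (units.map (fun u => (mergeB rep ra rb).getD u u)) from rfl]
          exact count_eq units (mergeB rep ra rb) hkeys'
        have hgpw : ∀ w, (groupsA fuel units
            (snapA fuel units ((findA fuel (findA fuel parent a).2 b).2.insert ra rb)).2).2.get? w
            = (snapA fuel units ((findA fuel (findA fuel parent a).2 b).2.insert ra rb)).2.get? w := by
          rw [groupsA]; exact hg2
        have hIg : InvP (groupsA fuel units
            (snapA fuel units ((findA fuel (findA fuel parent a).2 b).2.insert ra rb)).2).2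
            (mergeB rep ra rb) := InvP_congr _ _ _ hgpw hIs
        rw [hsnap, hgsize]
        exact ih _ (mergeB rep ra rb) _ hpre' hIg hkeys' 
    · dsimp only
      rw [if_neg hop, if_neg hop]
      exact ih parent rep steps hpre' hI hkeys

theorem tail_spec (units : List String) (fuel : Nat) (h3 : 3 ≤ fuel)
    (pA repB : PySem.Dict String String) (hI : InvP pA repB)
    (hkeys : repB.keys = PySem.Set.ofList units) :
    (snapA fuel units pA).1 = snapB units repB ∧
    (groupsA fuel units (snapA fuel units pA).2).1.size = countB repB := by
  have hmemu : ∀ u ∈ units, (repB.get? u).isSome := by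
    intro u hu
    obtain ⟨r, hr⟩ := exists_get?_of_mem repB units hkeys u hu
    rw [hr]; rfl
  have hI2 := InvP_imp_Inv2P pA repB hI
  obtain ⟨hs1, hs2⟩ := snap_go fuel h3 repB units pA PySem.Dict.empty hI2 hmemu
  have hsnap : (snapA fuel units pA).1 = snapB units repB := by
    rw [snapA, snapB]; exact hs1
  have hspw : ∀ w, (snapA fuel units pA).2.get? w
      = if w ∈ units then repB.get? w else pA.get? w := by
    rw [snapA]; exact hs2
  have hIs : InvP (snapA fuel units pA).2 repB :=
    InvP_after_snap units repB pA _ hkeys (fun u r h => (hI.2 u r h).2)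
      (fun w => hI.1 w) hspw
  obtain ⟨hg1, _⟩ := groups_go fuel h3 repB units (snapA fuel units pA).2
    PySem.Dict.empty hIs hmemu
  refine ⟨hsnap, ?_⟩
  rw [groupsA, size_eq_keys_length, hg1]
  rw [show PySem.Dict.empty.keys = ([] : List String) from rfl]
  rw [show PySem.Set.update ([] : List String) (units.map (fun u => repB.getD u u))
        = PySem.Set.ofList (units.map (fun u => repB.getD u u)) from rfl]
  exact count_eq units repB hkeys


-- ===== VERDICT (by name: the statement is the Claim_ definition above) =====
theorem union_find_sim_spec : Claim_equal_union_find_sim := by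
  unfold Claim_equal_union_find_sim
  intro units ops _ hpre
  unfold Spec_union_find_sim union_find_sim union_find_sim_alt
  dsimp only
  set fuel : Nat := units.length + 3 with hfuel
  have h3 : 3 ≤ fuel := by omega
  set rep0 : PySem.Dict String String :=
    units.foldl (fun d u => d.insert u u) PySem.Dict.empty with hrep0def
  have hrep0 : ∀ w, rep0.get? w = if w ∈ units then some w else none := by
    intro w
    rw [hrep0def, get?_foldl_insert_id units PySem.Dict.empty w]
    simp [PySem.Dict.get?_empty]
  have hI0 : InvP rep0 rep0 := by
    constructor
    · intro w; exact Iff.rfl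
    · intro u r hu
      have := hrep0 u
      rw [hu] at this
      by_cases hw : u ∈ units
      · rw [if_pos hw] at this
        injection this with h'
        subst h'
        exact ⟨hu, hu⟩
      · rw [if_neg hw] at this; cases this
  have hkeys0 : rep0.keys = PySem.Set.ofList units := by
    rw [hrep0def]
    rw [PySem.Dict.keys_foldl_insert units (fun _ x => x) PySem.Dict.empty]
    rfl
  have hmemu : ∀ u ∈ units, (rep0.get? u).isSome := by
    intro u hu; rw [hrep0 u, if_pos hu]; rfl
  -- initial snapshot
  obtain ⟨hs1, hs2⟩ := snap_go fuel h3 rep0 units rep0 PySem.Dict.empty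
    (InvP_imp_Inv2P rep0 rep0 hI0) hmemu
  have hsnap0 : (snapA fuel units rep0).1 = snapB units rep0 := by
    rw [snapA, snapB]; exact hs1
  have hspw0 : ∀ w, (snapA fuel units rep0).2.get? w
      = if w ∈ units then rep0.get? w else rep0.get? w := by
    rw [snapA]; exact hs2
  have hIs0 : InvP (snapA fuel units rep0).2 rep0 :=
    InvP_after_snap units rep0 rep0 _ hkeys0 (fun u r h => (hI0.2 u r h).2)
      (fun _ => Iff.rfl) hspw0
  rw [hsnap0]
  obtain ⟨hl1, hl2, hl3⟩ := loop_spec units fuel h3 ops (snapA fuel units rep0).2 rep0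
    [((snapB units rep0).items,
      "Initial State — " ++ PySem.Int.toStr (units.length : Int) ++ " Independent Units")]
    hpre hIs0 hkeys0
  rw [hl1]
  obtain ⟨ht1, ht2⟩ := tail_spec units fuel h3 _ _ hl2 hl3
  rw [ht1, ht2]
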